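-- pv_equiv track=rewrite | github.com/jruiperezv/ANALYSE | lms/djangoapps/learning_analytics/data_processing.py | class_time_on
-- ===== SOURCE A (Python) =====
-- def class_time_on(accum_days, accum_daily_time):
--
--     if len(accum_days) <= 0:
--         return [], 0
--
--     days = list(set(accum_days)) # to remove duplicates
--     days.sort()
--     daily_time = []
--     for i in range(0,len(days)):
--         daily_time.append(0)
--         while True:
--             try:
--                 daily_time[i] += accum_daily_time[accum_days.index(days[i])]
--                 accum_daily_time.pop(accum_days.index(days[i]))
--                 accum_days.remove(days[i])
--             except ValueError:
--                 break
--
--     return days, daily_time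
-- ===== SOURCE B (Python) =====
-- def class_time_on(accum_days, accum_daily_time):
--     # One pass: accumulate total time per day in a dict, then sort the keys.
--     # NOTE: unlike A, B does not mutate its arguments; equivalence is about the return value.
--     totals = {}
--     for d, t in zip(accum_days, accum_daily_time):
--         totals[d] = totals.get(d, 0) + t
--     days = sorted(totals)
--     return days, [totals[d] for d in days]
-- ===== Notes on version B (the rewrite author's own statement) =====
-- stated objective: faster
-- what changed: A repeatedly rescans and destructively pops the input lists with list.index/pop/remove per sorted day (quadratic); B accumulates totals per day in a single dict pass over zip(days, times) and sorts the distinct keys once.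
-- outside the precondition, e.g. on class_time_on([], []): A returns ([], 0), B returns ([], []); on class_time_on([1, 2], [5]): A raises IndexError, B returns ([1], [5])
import Mathlib
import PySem

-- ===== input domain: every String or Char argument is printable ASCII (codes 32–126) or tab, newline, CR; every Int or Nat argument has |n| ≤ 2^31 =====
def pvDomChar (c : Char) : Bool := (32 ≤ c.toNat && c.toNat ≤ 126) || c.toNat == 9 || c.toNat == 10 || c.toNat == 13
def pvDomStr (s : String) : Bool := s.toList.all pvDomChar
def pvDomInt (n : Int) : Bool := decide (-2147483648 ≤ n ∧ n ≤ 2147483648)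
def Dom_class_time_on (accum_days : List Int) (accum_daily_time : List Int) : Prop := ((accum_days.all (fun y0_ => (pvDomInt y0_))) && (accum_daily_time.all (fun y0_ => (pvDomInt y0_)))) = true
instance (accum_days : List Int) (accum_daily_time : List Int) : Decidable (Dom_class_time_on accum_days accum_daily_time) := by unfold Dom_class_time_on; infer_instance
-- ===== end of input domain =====

-- B replaces A's quadratic index/pop/remove rescans with a single dict-accumulation pass plus one sort
-- (A also empties/mutates its argument lists in place; B does not — the equivalence is about the return value).

-- ===== PORT A =====
-- the 'while True: try … except ValueError: break' inner loop; fuel only makes the same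
-- computation total (each successful iteration removes one element, so ads.length + 1 suffices)
def ctoInner (d : Int) : Nat → List Int → List Int → Int → Int × List Int × List Int
  | 0, ads, adt, acc => (acc, ads, adt)
  | fuel + 1, ads, adt, acc =>
    match PySem.List.index? ads d with
    | none => (acc, ads, adt)                                -- ValueError: break
    | some i =>
      -- daily_time[i] += accum_daily_time[accum_days.index(days[i])]
      -- (pyGetD/pop-getD are the total forms; under Pre_ the index is in range, as in Python)
      let acc' := acc + PySem.List.pyGetD adt (i : Int) 0
      let adt' := ((PySem.List.pop? adt (i : Int)).map Prod.snd).getD adt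
      let ads' := ((PySem.List.remove? ads d)).getD ads
      ctoInner d fuel ads' adt' acc'

def class_time_on (accum_days : List Int) (accum_daily_time : List Int) : List Int × List Int :=
  if accum_days.length ≤ 0 then ([], [])                     -- Python returns ([], 0): not a value of the type, excluded by Pre_
  else
    let days := PySem.List.sorted (PySem.Set.ofList accum_days) (fun x => x) false
    let st := days.foldl (fun (st : List Int × List Int × List Int) d =>
        (st.1 ++ [(ctoInner d (st.2.1.length + 1) st.2.1 st.2.2 0).1],
         (ctoInner d (st.2.1.length + 1) st.2.1 st.2.2 0).2.1,
         (ctoInner d (st.2.1.length + 1) st.2.1 st.2.2 0).2.2))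
      ([], accum_days, accum_daily_time)
    (days, st.1)

-- ===== PORT B =====
def class_time_on_alt (accum_days : List Int) (accum_daily_time : List Int) : List Int × List Int :=
  let totals := (accum_days.zip accum_daily_time).foldl
      (fun (m : PySem.Dict Int Int) p => m.insert p.1 (m.getD p.1 0 + p.2)) PySem.Dict.empty
  let days := PySem.List.sorted totals.keys (fun x => x) false
  (days, days.map (fun d => totals.getD d 0))                -- totals[d]: d is a key, so the default is never used

-- ===== PRECONDITION & SPEC =====
-- Pre_ excludes (i) empty accum_days, where A returns ([], 0), a 0 where the type demands a list;
-- (ii) accum_days longer than accum_daily_time, where A raises an uncaught IndexError (see Raises_).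
def Pre_class_time_on (accum_days : List Int) (accum_daily_time : List Int) : Prop :=
  accum_days ≠ [] ∧ accum_days.length ≤ accum_daily_time.length
instance (accum_days : List Int) (accum_daily_time : List Int) : Decidable (Pre_class_time_on accum_days accum_daily_time) := by unfold Pre_class_time_on; infer_instance
def pvWitness_class_time_on : List Int × List Int := ([3, 1, 3, 2, 1], [10, 20, 30, 40, 50])

def Spec_class_time_on (accum_days : List Int) (accum_daily_time : List Int) (out : List Int × List Int) : Prop := out = class_time_on_alt accum_days accum_daily_time
instance (accum_days : List Int) (accum_daily_time : List Int) (out : List Int × List Int) : Decidable (Spec_class_time_on accum_days accum_daily_time out) := by unfold Spec_class_time_on; infer_instance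

-- ===== CLAIM (what is proved, stated in full; the proofs are below) =====
def Claim_equal_class_time_on : Prop := ∀ (accum_days : List Int) (accum_daily_time : List Int), Dom_class_time_on accum_days accum_daily_time → Pre_class_time_on accum_days accum_daily_time → Spec_class_time_on accum_days accum_daily_time (class_time_on accum_days accum_daily_time)

-- ===== LEMMAS AND PROOFS =====

-- total time recorded for day d among the zipped (day, time) pairs
def sumFor (d : Int) (p : List (Int × Int)) : Int := ((p.filter (fun q => q.1 = d)).map Prod.snd).sum

lemma ctoInner_cons_ne {d a : Int} (b : Int) (h : a ≠ d) (fuel : Nat) :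
    ∀ (ads adt : List Int) (acc : Int), ads.length ≤ adt.length →
    ctoInner d fuel (a :: ads) (b :: adt) acc =
      ((ctoInner d fuel ads adt acc).1,
       a :: (ctoInner d fuel ads adt acc).2.1,
       b :: (ctoInner d fuel ads adt acc).2.2) := by
  induction fuel with
  | zero => intro ads adt acc _; simp [ctoInner]
  | succ n ih =>
    intro ads adt acc hlen
    rw [ctoInner, ctoInner, PySem.List.index?_cons_of_ne ads h]
    cases hidx : PySem.List.index? ads d with
    | none => simp
    | some i =>
      simp only [Option.map_some]
      have h1 : PySem.List.pyGetD (b :: adt) ((i + 1 : Nat) : Int) 0 = PySem.List.pyGetD adt (i : Int) 0 := by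
        rw [PySem.List.pyGetD_natCast, PySem.List.pyGetD_natCast]; simp
      have h2 : ((PySem.List.pop? (b :: adt) ((i + 1 : Nat) : Int)).map Prod.snd).getD (b :: adt)
          = b :: ((PySem.List.pop? adt (i : Int)).map Prod.snd).getD adt := by
        have hi : i < adt.length := by
          have hx := PySem.List.getElem_of_index?_eq_some hidx
          have := hx.choose; omega
        rw [PySem.List.pop?_natCast _ _ (by simpa using Nat.succ_lt_succ hi),
            PySem.List.pop?_natCast _ _ hi]
        simp [List.eraseIdx_cons_succ]
      have h3 : (PySem.List.remove? (a :: ads) d).getD (a :: ads)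
          = a :: (PySem.List.remove? ads d).getD ads := by
        rw [PySem.List.remove?_cons_of_ne ads h]
        cases PySem.List.remove? ads d <;> simp
      push_cast at h1 h2 ⊢
      have hi : i < adt.length := by
        have hx := PySem.List.getElem_of_index?_eq_some hidx
        have := hx.choose; omega
      have hmem : d ∈ ads := by
        obtain ⟨hk, hv, -⟩ := PySem.List.getElem_of_index?_eq_some hidx
        exact hv ▸ List.getElem_mem hk
      have hlen' : ((PySem.List.remove? ads d).getD ads).length ≤
          ((Option.map Prod.snd (PySem.List.pop? adt (i : Int))).getD adt).length := by
        rw [PySem.List.remove?_eq_some_erase ads d hmem, PySem.List.pop?_natCast _ _ hi]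
        simp [hmem, List.length_eraseIdx, hi]
        omega
      rw [h1, h2, h3, ih _ _ _ hlen']

lemma ctoInner_cons_self (d b : Int) (fuel : Nat) (ads adt : List Int) (acc : Int) :
    ctoInner d (fuel + 1) (d :: ads) (b :: adt) acc = ctoInner d fuel ads adt (acc + b) := by
  rw [ctoInner, PySem.List.index?_cons_self]
  simp [PySem.List.pop?_zero_cons]

lemma ctoInner_spec (d : Int) (p : List (Int × Int)) :
    ∀ (fuel : Nat) (t : List Int) (acc : Int),
      p.countP (fun q => q.1 == d) ≤ fuel →
      ctoInner d fuel (p.map Prod.fst) (p.map Prod.snd ++ t) acc =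
        (acc + sumFor d p,
         (p.filter (fun q => q.1 ≠ d)).map Prod.fst,
         (p.filter (fun q => q.1 ≠ d)).map Prod.snd ++ t) := by
  induction p with
  | nil =>
    intro fuel t acc _
    cases fuel <;> simp [ctoInner, sumFor, PySem.List.index?]
  | cons hd tl ih =>
    intro fuel t acc hfuel
    by_cases hd1 : hd.1 = d
    · have hcnt : tl.countP (fun q => q.1 == d) + 1 ≤ fuel := by
        simp [hd1] at hfuel ⊢; omega
      obtain ⟨n, rfl⟩ : ∃ n, fuel = n + 1 := ⟨fuel - 1, by omega⟩
      have : (hd :: tl).map Prod.fst = hd.1 :: tl.map Prod.fst := rfl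
      rw [this]
      have : ((hd :: tl).map Prod.snd ++ t) = hd.2 :: (tl.map Prod.snd ++ t) := rfl
      rw [this, hd1, ctoInner_cons_self, ih n t (acc + hd.2) (by omega)]
      simp [sumFor, hd1, add_assoc]
    · rw [show (hd :: tl).map Prod.fst = hd.1 :: tl.map Prod.fst from rfl,
          show ((hd :: tl).map Prod.snd ++ t) = hd.2 :: (tl.map Prod.snd ++ t) from rfl,
          ctoInner_cons_ne hd.2 hd1 fuel _ _ _ (by simp),
          ih fuel t acc (by simpa [List.countP_cons, hd1] using hfuel)]
      simp [sumFor, hd1]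

lemma sumFor_filter_ne {d d' : Int} (p : List (Int × Int)) (h : d' ≠ d) :
    sumFor d' (p.filter (fun q => q.1 ≠ d)) = sumFor d' p := by
  unfold sumFor
  rw [List.filter_filter]
  congr 1
  apply congrArg
  apply List.filter_congr
  intro q _
  by_cases hq : q.1 = d' <;> simp [hq, h]

lemma ctoOuter_spec (ds : List Int) :
    ∀ (p : List (Int × Int)) (t : List Int) (dt0 : List Int), ds.Nodup →
      ds.foldl (fun (st : List Int × List Int × List Int) d =>
          (st.1 ++ [(ctoInner d (st.2.1.length + 1) st.2.1 st.2.2 0).1],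
           (ctoInner d (st.2.1.length + 1) st.2.1 st.2.2 0).2.1,
           (ctoInner d (st.2.1.length + 1) st.2.1 st.2.2 0).2.2))
        (dt0, p.map Prod.fst, p.map Prod.snd ++ t)
      = (dt0 ++ ds.map (fun d => sumFor d p),
         (p.filter (fun q => q.1 ∉ ds)).map Prod.fst,
         (p.filter (fun q => q.1 ∉ ds)).map Prod.snd ++ t) := by
  induction ds with
  | nil => intro p t dt0 _; simp
  | cons d rest ih =>
    intro p t dt0 hnd
    rw [List.foldl_cons]
    have hstep := ctoInner_spec d p ((p.map Prod.fst).length + 1) t 0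
        (le_trans List.countP_le_length (by simp))
    simp only [hstep, zero_add]
    rw [ih (p.filter (fun q => q.1 ≠ d)) t (dt0 ++ [sumFor d p]) (List.nodup_cons.mp hnd).2]
    have hd_notin : d ∉ rest := (List.nodup_cons.mp hnd).1
    have hmap : rest.map (fun d' => sumFor d' (p.filter (fun q => q.1 ≠ d)))
        = rest.map (fun d' => sumFor d' p) := by
      apply List.map_congr_left
      intro d' hd'
      exact sumFor_filter_ne p (fun he => hd_notin (he ▸ hd'))
    have hfilter : (p.filter (fun q => q.1 ≠ d)).filter (fun q => q.1 ∉ rest)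
        = p.filter (fun q => q.1 ∉ (d :: rest)) := by
      rw [List.filter_filter]
      apply List.filter_congr
      intro q _
      by_cases h1 : q.1 = d <;> simp [h1]
    rw [hmap, hfilter]
    simp

lemma getD_foldl_insert_add (p : List (Int × Int)) :
    ∀ (m : PySem.Dict Int Int) (d : Int),
      (p.foldl (fun m q => m.insert q.1 (m.getD q.1 0 + q.2)) m).getD d 0
        = m.getD d 0 + sumFor d p := by
  induction p with
  | nil => intro m d; simp [sumFor]
  | cons q tl ih =>
    intro m d
    rw [List.foldl_cons, ih]
    by_cases h : q.1 = d
    · rw [h, PySem.Dict.getD_insert_self]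
      simp [sumFor, h, add_assoc]
    · rw [PySem.Dict.getD_insert_of_ne m _ _ (fun he => h he.symm)]
      simp [sumFor, h]

lemma map_snd_zip_of_le (l1 l2 : List Int) (h : l1.length ≤ l2.length) :
    (l1.zip l2).map Prod.snd = l2.take l1.length := by
  induction l1 generalizing l2 with
  | nil => simp
  | cons a t ihh => cases l2 with
    | nil => simp at h
    | cons b t2 => simp at h ⊢; exact ihh t2 h

lemma class_time_on_eq : ∀ (ads adt : List Int), ads ≠ [] → ads.length ≤ adt.length →
    class_time_on ads adt = class_time_on_alt ads adt := by
  intro ads adt hne hlen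
  have hif : ¬ ads.length ≤ 0 := by
    cases ads with
    | nil => exact absurd rfl hne
    | cons _ _ => simp
  set p : List (Int × Int) := ads.zip adt with hp
  have hfst : p.map Prod.fst = ads := List.map_fst_zip hlen
  have hsnd : p.map Prod.snd ++ adt.drop ads.length = adt := by
    rw [hp, map_snd_zip_of_le ads adt hlen, List.take_append_drop]
  -- A side
  have hdaysA : PySem.List.sorted (PySem.Set.ofList ads) (fun x => x) false
      = PySem.List.sorted (PySem.Set.ofList (p.map Prod.fst)) (fun x => x) false := by rw [hfst]
  have hnd : (PySem.List.sorted (PySem.Set.ofList ads) (fun x => x) false).Nodup :=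
    List.Perm.nodup (PySem.List.sorted_perm (PySem.Set.ofList ads) (fun x => x) false).symm (PySem.Set.nodup_ofList ads)
  have hA : class_time_on ads adt
      = (PySem.List.sorted (PySem.Set.ofList ads) (fun x => x) false,
         (PySem.List.sorted (PySem.Set.ofList ads) (fun x => x) false).map (fun d => sumFor d p)) := by
    rw [class_time_on, if_neg hif]
    have := ctoOuter_spec (PySem.List.sorted (PySem.Set.ofList ads) (fun x => x) false)
        p (adt.drop ads.length) [] hnd
    rw [hfst, hsnd] at this
    simp only [this, List.nil_append]
  -- B side
  have hkeys : ((p.foldl (fun (m : PySem.Dict Int Int) q => m.insert q.1 (m.getD q.1 0 + q.2))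
      PySem.Dict.empty)).keys = PySem.Set.ofList ads := by
    rw [PySem.Dict.keys_foldl_insert_key p Prod.fst
        (fun m q => m.getD q.1 0 + q.2) PySem.Dict.empty, hfst]
    simp [PySem.Set.update, PySem.Set.ofList, PySem.Dict.keys, PySem.Dict.empty]
  rw [hA, class_time_on_alt]
  simp only [← hp, hkeys]
  congr 1
  apply List.map_congr_left
  intro d _
  rw [getD_foldl_insert_add p PySem.Dict.empty d, PySem.Dict.getD_empty]
  ring

-- ===== VERDICT =====
theorem class_time_on_spec : Claim_equal_class_time_on := by
  intro ads adt _ hpre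
  unfold Spec_class_time_on
  exact class_time_on_eq ads adt hpre.1 hpre.2
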